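-- pv_equiv track=rewrite | github.com/ShaunJPartridge/4663-Cryptography-Partridge | Assignments/A04/adfgx.py | Keyword_Letter_Num
-- ===== SOURCE A (Python) =====
-- def Keyword_Letter_Num(key):
--     alphabet = "ABCDEFGHIJKLMNOPQRSTUVWXYZ"
--     num_list = list(range(len(key)))
--     pos = 0
--     for i in range(len(alphabet)):
--         for j in range(len(key)):
--             if alphabet[i] == key[j]:
--                 pos += 1
--                 num_list[j] = pos
--     return num_list
-- ===== SOURCE B (Python) =====
-- def Keyword_Letter_Num(key):
--     alphabet = "ABCDEFGHIJKLMNOPQRSTUVWXYZ"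
--     letters = set(alphabet)
--     # counting-sort ranks: count each letter, prefix-sum the counts in
--     # alphabetical order, then assign ranks in one left-to-right pass
--     counts = {}
--     for c in key:
--         if c in letters:
--             counts[c] = counts.get(c, 0) + 1
--     start = {}
--     total = 0
--     for c in alphabet:
--         start[c] = total
--         total += counts.get(c, 0)
--     num_list = []
--     seen = {}
--     for j, c in enumerate(key):
--         if c in letters:
--             seen[c] = seen.get(c, 0) + 1
--             num_list.append(start[c] + seen[c])
--         else:
--             num_list.append(j)
--     return num_list
-- ===== Notes on version B (the rewrite author's own statement) =====
-- stated objective: faster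
-- what changed: Replaces A's 26 nested scans of the key (one per alphabet letter, assigning ranks in place) by a counting-sort rank computation: one pass counting each letter, a prefix sum over the alphabet giving each letter's starting rank, and one assignment pass appending start[c]+occurrence-number.
import Mathlib
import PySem

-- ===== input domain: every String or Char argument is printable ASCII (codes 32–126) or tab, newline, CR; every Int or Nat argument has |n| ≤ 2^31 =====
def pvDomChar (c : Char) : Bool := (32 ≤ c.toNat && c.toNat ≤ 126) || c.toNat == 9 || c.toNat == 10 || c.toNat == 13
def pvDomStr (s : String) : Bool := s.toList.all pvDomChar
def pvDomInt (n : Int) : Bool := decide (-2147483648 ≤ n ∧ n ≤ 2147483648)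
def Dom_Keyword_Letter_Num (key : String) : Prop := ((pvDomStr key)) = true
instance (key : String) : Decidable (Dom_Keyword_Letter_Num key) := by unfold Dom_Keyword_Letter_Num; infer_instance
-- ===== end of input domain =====

-- B replaces A's 26 nested scans of the key by a counting-sort rank computation
-- (letter counts, a prefix sum over the alphabet, one assignment pass); measured faster, same result.

-- ===== PORT A =====
def Keyword_Letter_Num (key : String) : List Int :=
  let alphabet : String := "ABCDEFGHIJKLMNOPQRSTUVWXYZ"
  let num_list : List Int := PySem.List.pyRange 0 (PySem.Str.len key) 1
  let st : List Int × Int :=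
    (PySem.List.pyRange 0 (PySem.Str.len alphabet) 1).foldl
      (fun st i =>
        (PySem.List.pyRange 0 (PySem.Str.len key) 1).foldl
          (fun st j =>
            if PySem.List.pyGetD alphabet.toList i ' ' == PySem.List.pyGetD key.toList j ' ' then
              (PySem.List.pySetD st.1 j (st.2 + 1), st.2 + 1)
            else st) st)
      (num_list, 0)
  st.1

-- ===== PORT B =====
def Keyword_Letter_Num_alt (key : String) : List Int :=
  let alphabet : String := "ABCDEFGHIJKLMNOPQRSTUVWXYZ"
  let letters : PySem.Set Char := PySem.Set.ofList alphabet.toList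
  let counts : PySem.Dict Char Int :=
    key.toList.foldl
      (fun d c => if PySem.Set.contains letters c then d.insert c (d.getD c 0 + 1) else d)
      PySem.Dict.empty
  let st : PySem.Dict Char Int × Int :=
    alphabet.toList.foldl
      (fun p c => (p.1.insert c p.2, p.2 + counts.getD c 0))
      (PySem.Dict.empty, 0)
  let start := st.1
  let res : List Int × PySem.Dict Char Int :=
    (PySem.List.enumerate key.toList 0).foldl
      (fun q jc =>
        if PySem.Set.contains letters jc.2 then
          (q.1 ++ [start.getD jc.2 0 + (q.2.getD jc.2 0 + 1)], q.2.insert jc.2 (q.2.getD jc.2 0 + 1))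
        else (q.1 ++ [jc.1], q.2))
      ([], PySem.Dict.empty)
  res.1

-- ===== PRECONDITION & SPEC =====
def Spec_Keyword_Letter_Num (key : String) (out : List Int) : Prop := out = Keyword_Letter_Num_alt key
instance (key : String) (out : List Int) : Decidable (Spec_Keyword_Letter_Num key out) := by unfold Spec_Keyword_Letter_Num; infer_instance

-- ===== CLAIM (what is proved, stated in full; the proofs are below) =====
def Claim_equal_Keyword_Letter_Num : Prop := ∀ (key : String), Dom_Keyword_Letter_Num key → Spec_Keyword_Letter_Num key (Keyword_Letter_Num key)

-- ===== LEMMAS AND PROOFS =====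

def pvAlpha : List Char := "ABCDEFGHIJKLMNOPQRSTUVWXYZ".toList
def pvIsL (c : Char) : Bool := pvAlpha.contains c

-- letters set evaluates to pvAlpha and its contains is pvIsL
theorem pv_contains_eq (c : Char) :
    PySem.Set.contains (PySem.Set.ofList "ABCDEFGHIJKLMNOPQRSTUVWXYZ".toList) c = pvIsL c := by
  have h : PySem.Set.ofList "ABCDEFGHIJKLMNOPQRSTUVWXYZ".toList = pvAlpha := by decide
  rw [h]
  rfl

-- counts dict lookup
theorem pv_counts_getD (cs : List Char) (c : Char) :
    (cs.foldl (fun d c => if pvIsL c then d.insert c (d.getD c 0 + 1) else d)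
      (PySem.Dict.empty : PySem.Dict Char Int)).getD c 0
    = ((cs.filter pvIsL).count c : Int) := by
  rw [← List.foldl_filter, PySem.Dict.foldl_insert_getD_add_one_eq_counter,
    PySem.Dict.getD_counter]

theorem pv_startfold_not_mem (cnt : Char → Int) (as : List Char)
    (d : PySem.Dict Char Int) (t : Int) (c : Char) (hc : c ∉ as) :
    ((as.foldl (fun p x => (p.1.insert x p.2, p.2 + cnt x)) (d, t)).1).getD c 0 = d.getD c 0 := by
  induction as generalizing d t with
  | nil => rfl
  | cons a as ih =>
      simp only [List.mem_cons, not_or] at hc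
      simp only [List.foldl_cons]
      rw [ih _ _ hc.2, PySem.Dict.getD_insert]
      simp [hc.1]

theorem pv_startfold_getD (cnt : Char → Int) (as : List Char)
    (d : PySem.Dict Char Int) (t : Int) (c : Char) (hnd : as.Nodup) (hc : c ∈ as) :
    ((as.foldl (fun p x => (p.1.insert x p.2, p.2 + cnt x)) (d, t)).1).getD c 0
    = t + ((as.takeWhile (fun x => x ≠ c)).map cnt).sum := by
  induction as generalizing d t with
  | nil => cases hc
  | cons a as ih =>
      rw [List.nodup_cons] at hnd
      by_cases hac : a = c
      · subst hac
        simp only [List.foldl_cons, List.takeWhile_cons]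
        rw [pv_startfold_not_mem _ _ _ _ _ hnd.1, PySem.Dict.getD_insert]
        simp
      · have hc' : c ∈ as := by
          cases List.mem_cons.mp hc with
          | inl h => exact absurd h.symm hac
          | inr h => exact h
        simp only [List.foldl_cons, List.takeWhile_cons]
        rw [ih _ _ hnd.2 hc']
        have : (a ≠ c) = True := by simp [hac]
        simp [hac, add_assoc]

theorem pv_takeWhile_ne_eq_filter_lt (as : List Char) (c : Char)
    (hs : as.Pairwise (· < ·)) (hc : c ∈ as) :
    as.takeWhile (fun x => x ≠ c) = as.filter (fun x => x < c) := by
  induction as with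
  | nil => cases hc
  | cons a as ih =>
      rw [List.pairwise_cons] at hs
      by_cases hac : a = c
      · subst hac
        have h1 : as.filter (fun x => decide (x < a)) = [] := by
          rw [List.filter_eq_nil_iff]
          intro x hx
          simp only [decide_eq_true_eq]
          exact not_lt.mpr (le_of_lt (hs.1 x hx))
        simp [h1]
      · have hc' : c ∈ as := by
          cases List.mem_cons.mp hc with
          | inl h => exact absurd h.symm hac
          | inr h => exact h
        have hlt : a < c := hs.1 c hc'
        simp only [List.takeWhile_cons, List.filter_cons]
        have h2 : (decide ¬a = c) = true := by simp [hac]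
        simp only [ne_eq, h2, decide_eq_true_eq, hlt, if_pos]
        rw [List.cons.injEq]
        refine ⟨rfl, ?_⟩
        simpa using ih hs.2 hc'

theorem pv_sum_ite_mem (as : List Char) (d : Char) (hnd : as.Nodup) :
    ((as.map (fun a => if a = d then 1 else 0)).sum : Nat)
      = if d ∈ as then 1 else 0 := by
  induction as with
  | nil => simp
  | cons a as ih =>
      rw [List.nodup_cons] at hnd
      by_cases had : a = d
      · subst had
        simp [ih hnd.2, hnd.1]
      · simp [had, ih hnd.2, Ne.symm had]

theorem pv_sum_map_add_nat (as : List Char) (f g : Char → Nat) :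
    (as.map (fun a => f a + g a)).sum = (as.map f).sum + (as.map g).sum := by
  induction as with
  | nil => simp
  | cons b bs ih => simp [ih]; omega

theorem pv_sum_counts_nat (as : List Char) (hnd : as.Nodup) (cs : List Char) :
    (as.map (fun a => cs.count a)).sum = cs.countP (fun d => as.contains d) := by
  induction cs with
  | nil => simp
  | cons d cs ih =>
      simp only [List.count_cons, List.countP_cons]
      rw [← ih]
      have h2 : as.map (fun a => cs.count a + if d == a then 1 else 0)
          = as.map (fun a => cs.count a + if a = d then 1 else 0) := by
        refine List.map_congr_left ?_
        intro a _
        have h3 : (d == a) = decide (a = d) := by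
          by_cases h : a = d
          · rw [h]; simp
          · rw [decide_eq_false h, beq_eq_false_iff_ne]
            exact fun hda => h hda.symm
        rw [h3]
        simp
      rw [h2, pv_sum_map_add_nat, pv_sum_ite_mem as d hnd]
      simp [List.contains_eq_mem]

-- start dict lookup for a letter c: number of letter occurrences in cs with smaller char
theorem pv_start_getD (cs : List Char) (c : Char) (hc : pvIsL c = true) :
    ((pvAlpha.foldl
        (fun p x => (p.1.insert x p.2, p.2 +
          (cs.foldl (fun d c => if pvIsL c then d.insert c (d.getD c 0 + 1) else d)
            (PySem.Dict.empty : PySem.Dict Char Int)).getD x 0))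
        ((PySem.Dict.empty : PySem.Dict Char Int), 0)).1).getD c 0
    = ((cs.countP (fun d => pvIsL d && decide (d < c))) : Int) := by
  have hmem : c ∈ pvAlpha := by
    simpa [pvIsL, List.contains_eq_mem] using hc
  rw [pv_startfold_getD _ _ _ _ _ (by decide) hmem]
  rw [pv_takeWhile_ne_eq_filter_lt _ _ (by decide) hmem]
  have h1 : (pvAlpha.filter (fun x => x < c)).map
      (fun x => (cs.foldl (fun d c => if pvIsL c then d.insert c (d.getD c 0 + 1) else d)
            (PySem.Dict.empty : PySem.Dict Char Int)).getD x 0)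
      = (pvAlpha.filter (fun x => x < c)).map (fun x => (((cs.filter pvIsL).count x : Nat) : Int)) := by
    refine List.map_congr_left ?_
    intro a _
    rw [pv_counts_getD]
  rw [h1]
  rw [show (fun x => (((cs.filter pvIsL).count x : Nat) : Int)) = (fun n : Nat => (n : Int)) ∘ (fun x => (cs.filter pvIsL).count x) from rfl]
  rw [← List.map_map, ← Nat.cast_list_sum]
  rw [pv_sum_counts_nat _ (List.Nodup.filter _ (by decide)) (cs.filter pvIsL)]
  rw [List.countP_filter]
  have h2 : (fun d => (pvAlpha.filter (fun x => x < c)).contains d && pvIsL d)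
      = (fun d => pvIsL d && decide (d < c)) := by
    funext d
    simp only [List.contains_eq_mem, List.mem_filter, pvIsL, Bool.and_comm]
    by_cases h : d ∈ pvAlpha <;> simp [h, List.contains_eq_mem]
  rw [h2]
  simp

theorem pv_pass3 (start : PySem.Dict Char Int) (t : List Char) (s : Nat)
    (acc : List Int) (seen : PySem.Dict Char Int) :
    ((PySem.List.enumerate t (s : Int)).foldl
      (fun q jc =>
        if pvIsL jc.2 then
          (q.1 ++ [start.getD jc.2 0 + (q.2.getD jc.2 0 + 1)], q.2.insert jc.2 (q.2.getD jc.2 0 + 1))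
        else (q.1 ++ [jc.1], q.2))
      (acc, seen)).1
    = acc ++ (List.range t.length).map (fun k =>
        if pvIsL (t.getD k ' ')
        then start.getD (t.getD k ' ') 0
          + (seen.getD (t.getD k ' ') 0 + ((t.take (k+1)).count (t.getD k ' ') : Int))
        else ((s : Int) + k)) := by
  induction t generalizing s acc seen with
  | nil => simp [PySem.List.enumerate]
  | cons c0 t ih =>
      rw [PySem.List.enumerate_cons, List.foldl_cons]
      by_cases h0 : pvIsL c0 = true
      · simp only [h0, if_pos]
        have hcast : ((s : Int) + 1) = ((s + 1 : Nat) : Int) := by push_cast; ring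
        rw [hcast, ih]
        rw [List.length_cons, List.range_succ_eq_map, List.map_cons, List.map_map]
        rw [List.append_assoc, List.singleton_append]
        congr 1
        congr 1
        · simp [h0]
        · refine List.map_congr_left ?_
          intro k _
          simp only [Function.comp]
          have hgd : (c0 :: t).getD (k + 1) ' ' = t.getD k ' ' := rfl
          have htk : (c0 :: t).take (k + 1 + 1) = c0 :: t.take (k + 1) := rfl
          rw [hgd, htk, List.count_cons]
          by_cases hd : t.getD k ' ' = c0
          · rw [hd]
            have hb : (c0 == c0) = true := by simp
            simp only [PySem.Dict.getD_insert, hb, h0, if_pos]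
            push_cast
            ring
          · have hb : (c0 == t.getD k ' ') = false := by
              rw [beq_eq_false_iff_ne]
              exact fun he => hd he.symm
            simp only [PySem.Dict.getD_insert, hd, if_false, hb, Bool.false_eq_true, add_zero]
            have hc2 : ((k : Int) + 1) = ((s+1:Nat):Int) + k - s := by push_cast; ring
            by_cases hL : pvIsL (t.getD k ' ') = true
            · simp only [hL, if_pos]
            · simp only [hL, if_false, Bool.false_eq_true]
              push_cast
              ring
      · simp only [h0, Bool.false_eq_true, if_false]
        have hcast : ((s : Int) + 1) = ((s + 1 : Nat) : Int) := by push_cast; ring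
        rw [hcast, ih]
        rw [List.length_cons, List.range_succ_eq_map, List.map_cons, List.map_map]
        rw [List.append_assoc, List.singleton_append]
        congr 1
        congr 1
        · simp [h0]
        · refine List.map_congr_left ?_
          intro k _
          simp only [Function.comp]
          have hgd : (c0 :: t).getD (k + 1) ' ' = t.getD k ' ' := rfl
          have htk : (c0 :: t).take (k + 1 + 1) = c0 :: t.take (k + 1) := rfl
          rw [hgd, htk, List.count_cons]
          by_cases hL : pvIsL (t.getD k ' ') = true
          · have hb : (c0 == t.getD k ' ') = false := by
              rw [beq_eq_false_iff_ne]
              intro he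
              rw [← he] at hL
              exact h0 hL
            simp only [hL, if_pos, hb, Bool.false_eq_true, if_false, add_zero]
          · simp only [hL, if_false, Bool.false_eq_true]
            push_cast
            ring

def pvRank (cs : List Char) (m : Nat) : Int :=
  ((cs.countP (fun d => pvIsL d && decide (d < cs.getD m ' '))) : Int)
    + (((cs.take (m + 1)).count (cs.getD m ' ')) : Int)

def pvModel (cs : List Char) : List Int :=
  (List.range cs.length).map (fun m => if pvIsL (cs.getD m ' ') then pvRank cs m else (m : Int))

theorem pv_pass3_zero (start : PySem.Dict Char Int) (t : List Char)
    (acc : List Int) (seen : PySem.Dict Char Int) :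
    ((PySem.List.enumerate t (0 : Int)).foldl
      (fun q jc =>
        if pvIsL jc.2 then
          (q.1 ++ [start.getD jc.2 0 + (q.2.getD jc.2 0 + 1)], q.2.insert jc.2 (q.2.getD jc.2 0 + 1))
        else (q.1 ++ [jc.1], q.2))
      (acc, seen)).1
    = acc ++ (List.range t.length).map (fun k =>
        if pvIsL (t.getD k ' ')
        then start.getD (t.getD k ' ') 0
          + (seen.getD (t.getD k ' ') 0 + ((t.take (k+1)).count (t.getD k ' ') : Int))
        else (k : Int)) := by
  have h := pv_pass3 start t 0 acc seen
  simpa using h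

theorem B_eq_model (key : String) : Keyword_Letter_Num_alt key = pvModel key.toList := by
  unfold Keyword_Letter_Num_alt
  simp only [pv_contains_eq]
  rw [pv_pass3_zero]
  rw [pvModel]
  rw [show "ABCDEFGHIJKLMNOPQRSTUVWXYZ".toList = pvAlpha from rfl]
  rw [List.nil_append]
  refine List.map_congr_left ?_
  intro m hm
  by_cases hL : pvIsL (key.toList.getD m ' ') = true
  · simp only [hL, if_pos, PySem.Dict.getD_empty]
    rw [pv_start_getD _ _ hL, pvRank]
    ring
  · simp only [hL, if_false, Bool.false_eq_true]

def pvStep (st : List Int × Int) (jc : Int × Char) : List Int × Int :=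
  (PySem.List.pySetD st.1 jc.1 (st.2 + 1), st.2 + 1)

def pvE (cs : List Char) : List (Int × Char) :=
  pvAlpha.flatMap (fun a => (PySem.List.enumerate cs 0).filter (fun jc => a == jc.2))

theorem pv_foldl_foldl_flatMap {α β γ : Type} (as : List γ) (g : γ → List β)
    (f : α → β → α) (init : α) :
    as.foldl (fun st a => (g a).foldl f st) init = (as.flatMap g).foldl f init := by
  induction as generalizing init with
  | nil => rfl
  | cons a as ih => simp [List.foldl_append, ih]

theorem pv_rfold_len (E : List (Int × Char)) (l : List Int) (p : Int) :
    ((E.foldl pvStep (l, p)).1).length = l.length := by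
  induction E generalizing l p with
  | nil => rfl
  | cons q E ih => simp [pvStep, ih, PySem.List.length_pySetD]

theorem pv_rfold_getD (E : List (Int × Char)) (l : List Int) (p : Int)
    (hnd : (E.map (·.1)).Nodup) (hb : ∀ q ∈ E, 0 ≤ q.1 ∧ q.1 < (l.length : Int)) (m : Nat)
    (hm : m < l.length) :
    PySem.List.pyGetD ((E.foldl pvStep (l, p)).1) m 0 =
      match E.findIdx? (fun q => q.1 == (m : Int)) with
      | some k => p + k + 1
      | none => PySem.List.pyGetD l (m : Int) 0 := by
  induction E generalizing l p with
  | nil => simp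
  | cons q E ih =>
      rw [List.map_cons, List.nodup_cons] at hnd
      have hq := hb q (List.mem_cons_self)
      have hb' : ∀ r ∈ E, 0 ≤ r.1 ∧ r.1 < ((PySem.List.pySetD l q.1 (p + 1)).length : Int) := by
        intro r hr
        rw [PySem.List.length_pySetD]
        exact hb r (List.mem_cons_of_mem _ hr)
      have hm' : m < (PySem.List.pySetD l q.1 (p + 1)).length := by
        rw [PySem.List.length_pySetD]; exact hm
      have hfold : (q :: E).foldl pvStep (l, p)
          = E.foldl pvStep (PySem.List.pySetD l q.1 (p + 1), p + 1) := rfl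
      rw [hfold, ih _ _ hnd.2 hb' hm', List.findIdx?_cons]
      by_cases heq : q.1 = (m : Int)
      · have hbeq : (q.1 == (m : Int)) = true := by simp [heq]
        rw [hbeq, if_pos rfl]
        have hnone : E.findIdx? (fun r => r.1 == (m : Int)) = none := by
          rw [List.findIdx?_eq_none_iff]
          intro r hr
          rw [beq_eq_false_iff_ne]
          intro hr1
          exact hnd.1 (by rw [heq, ← hr1]; exact List.mem_map_of_mem hr)
        rw [hnone]
        rw [heq]
        rw [PySem.List.pyGetD_pySetD_natCast l m m (p + 1) 0 hm]
        simp
      · have hbeq : (q.1 == (m : Int)) = false := by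
          rw [beq_eq_false_iff_ne]; exact heq
        rw [hbeq]
        simp only [Bool.false_eq_true, if_false]
        cases hE : E.findIdx? (fun r => r.1 == (m : Int)) with
        | some k =>
            simp only [Option.map_some]
            show p + 1 + (k : Int) + 1 = p + ((k + 1 : Nat) : Int) + 1
            push_cast
            ring
        | none =>
            simp only [Option.map_none]
            show PySem.List.pyGetD (PySem.List.pySetD l q.1 (p + 1)) (m : Int) 0
              = PySem.List.pyGetD l (m : Int) 0
            have hq1 : q.1 = ((q.1.toNat : Nat) : Int) := (Int.toNat_of_nonneg hq.1).symm
            rw [hq1]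
            rw [PySem.List.pyGetD_pySetD_natCast l q.1.toNat m (p + 1) 0
              (by omega)]
            have : ¬ m = q.1.toNat := by omega
            rw [if_neg this]

theorem pv_block_len (t : List Char) (s : Int) (a : Char) :
    (((PySem.List.enumerate t s).filter (fun jc => a == jc.2)).length) = t.count a := by
  induction t generalizing s with
  | nil => simp [PySem.List.enumerate]
  | cons d t ih =>
      rw [PySem.List.enumerate_cons, List.filter_cons, List.count_cons]
      by_cases h : (a == d) = true
      · have h2 : (d == a) = true := by
          rw [beq_iff_eq] at h ⊢; exact h.symm
        simp [h, h2, ih]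
      · have h2 : (d == a) = false := by
          rw [beq_eq_false_iff_ne]
          intro hda; exact h (by rw [beq_iff_eq]; exact hda.symm)
        simp [h, h2, ih]

theorem pv_block_findIdx (t : List Char) (s : Nat) (m : Nat) (c : Char)
    (hm : m < t.length) (hc : t.getD m ' ' = c) :
    ((PySem.List.enumerate t (s : Int)).filter (fun jc => c == jc.2)).findIdx?
        (fun q => q.1 == ((s + m : Nat) : Int))
      = some ((t.take m).count c) := by
  induction t generalizing s m with
  | nil => simp at hm
  | cons d t ih =>
      rw [PySem.List.enumerate_cons, List.filter_cons]
      cases m with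
      | zero =>
          have hdc : d = c := hc
          subst hdc
          simp only [beq_self_eq_true, if_pos]
          rw [List.findIdx?_cons]
          simp
      | succ m' =>
          have hm' : m' < t.length := by simpa using hm
          have hc' : t.getD m' ' ' = c := hc
          have hcast : ((s + (m' + 1) : Nat) : Int) = (((s + 1) + m' : Nat) : Int) := by
            push_cast; ring
          by_cases h : (c == d) = true
          · simp only [h, if_pos]
            rw [List.findIdx?_cons]
            have hne : (((s : Int)) == ((s + (m' + 1) : Nat) : Int)) = false := by
              rw [beq_eq_false_iff_ne]
              intro he
              push_cast at he
              omega
            rw [hne]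
            simp only [Bool.false_eq_true, if_false]
            have hcast2 : ((s : Int) + 1) = (((s + 1 : Nat)) : Int) := by push_cast; ring
            rw [hcast2]
            have := ih (s + 1) m' hm' hc'
            rw [hcast]
            rw [this]
            simp only [Option.map_some]
            have hdc : (d == c) = true := by
              rw [beq_iff_eq] at h ⊢; exact h.symm
            rw [List.take_succ_cons, List.count_cons, hdc]
            simp
          · simp only [h, Bool.false_eq_true, if_false]
            have hcast2 : ((s : Int) + 1) = (((s + 1 : Nat)) : Int) := by push_cast; ring
            rw [hcast2, hcast, ih (s + 1) m' hm' hc']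
            have hdc : (d == c) = false := by
              rw [beq_eq_false_iff_ne]
              intro hda; exact h (by rw [beq_iff_eq]; exact hda.symm)
            rw [List.take_succ_cons, List.count_cons, hdc]
            simp

theorem pv_findIdx_flatMap (as : List Char) (g : Char → List (Int × Char))
    (p : Int × Char → Bool) (c : Char) (hc : c ∈ as)
    (hnone : ∀ a ∈ as, a ≠ c → (g a).findIdx? p = none)
    (k : Nat) (hk : (g c).findIdx? p = some k) :
    (as.flatMap g).findIdx? p
      = some (((as.takeWhile (fun x => x ≠ c)).map (fun a => (g a).length)).sum + k) := by
  induction as with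
  | nil => cases hc
  | cons a as ih =>
      rw [List.flatMap_cons, List.findIdx?_append]
      by_cases hac : a = c
      · subst hac
        rw [hk]
        simp
      · rw [hnone a List.mem_cons_self hac]
        have hc' : c ∈ as := by
          cases List.mem_cons.mp hc with
          | inl h => exact absurd h.symm hac
          | inr h => exact h
        rw [ih hc' (fun b hb => hnone b (List.mem_cons_of_mem _ hb))]
        simp only [Option.none_or, Option.map_some]
        congr 1
        have : (decide ¬a = c) = true := by simp [hac]
        simp only [List.takeWhile_cons, ne_eq, this, if_pos, List.map_cons, List.sum_cons]
        omega

theorem pv_mem_block_map (cs : List Char) (a : Char) (x : Int) :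
    x ∈ (((PySem.List.enumerate cs 0).filter (fun jc => a == jc.2)).map (·.1))
    ↔ ∃ k : Nat, ∃ _ : k < cs.length, x = (k : Int) ∧ cs[k] = a := by
  constructor
  · intro hx
    rcases List.mem_map.mp hx with ⟨q, hq, hq1⟩
    rcases List.mem_filter.mp hq with ⟨hqe, hqa⟩
    rcases (PySem.List.mem_enumerate_iff cs 0 q).mp hqe with ⟨k, hk, hqk⟩
    refine ⟨k, hk, ?_, ?_⟩
    · rw [← hq1, hqk]; simp
    · rw [beq_iff_eq] at hqa
      rw [hqk] at hqa
      exact hqa.symm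
  · rintro ⟨k, hk, hx, hck⟩
    refine List.mem_map.mpr ⟨((k : Int), cs[k]), ?_, by simp [hx]⟩
    refine List.mem_filter.mpr ⟨?_, by simp [hck]⟩
    exact (PySem.List.mem_enumerate_iff cs 0 _).mpr ⟨k, hk, by simp⟩

theorem pv_E_bound (cs : List Char) : ∀ q ∈ pvE cs, 0 ≤ q.1 ∧ q.1 < (cs.length : Int) := by
  intro q hq
  rcases List.mem_flatMap.mp hq with ⟨a, _, hqa⟩
  rcases List.mem_filter.mp hqa with ⟨hqe, _⟩
  rcases (PySem.List.mem_enumerate_iff cs 0 q).mp hqe with ⟨k, hk, hqk⟩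
  rw [hqk]
  constructor
  · simp
  · simp
    omega

theorem pv_E_nodup (cs : List Char) : ((pvE cs).map (·.1)).Nodup := by
  rw [pvE, List.map_flatMap]
  rw [List.nodup_flatMap]
  constructor
  · intro a _
    refine List.Nodup.sublist (List.Sublist.map _ List.filter_sublist) ?_
    rw [PySem.List.map_fst_enumerate]
    exact PySem.List.nodup_pyRange_one _ _
  · refine List.Pairwise.imp ?_ (List.nodup_iff_pairwise_ne.mp (by decide : pvAlpha.Nodup))
    intro a b hab
    rw [Function.onFun]
    intro x hxa hxb
    rcases (pv_mem_block_map cs a x).mp hxa with ⟨k, hk, hx, hck⟩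
    rcases (pv_mem_block_map cs b x).mp hxb with ⟨k', hk', hx', hck'⟩
    have hkk : k = k' := by
      rw [hx] at hx'
      exact_mod_cast hx'
    subst hkk
    exact hab (by rw [← hck, hck'])

theorem pv_E_findIdx_none (cs : List Char) (m : Nat) (hm : m < cs.length)
    (hL : pvIsL (cs.getD m ' ') = false) :
    (pvE cs).findIdx? (fun q => q.1 == (m : Int)) = none := by
  rw [List.findIdx?_eq_none_iff]
  intro q hq
  rcases List.mem_flatMap.mp hq with ⟨a, ha, hqa⟩
  rcases List.mem_filter.mp hqa with ⟨hqe, hqc⟩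
  rcases (PySem.List.mem_enumerate_iff cs 0 q).mp hqe with ⟨k, hk, hqk⟩
  rw [beq_eq_false_iff_ne]
  intro hq1
  rw [hqk] at hq1 hqc
  simp only [zero_add] at hq1
  have hkm : k = m := by exact_mod_cast hq1
  subst hkm
  rw [beq_iff_eq] at hqc
  have hac : a = cs[k] := hqc
  rw [List.getD_eq_getElem cs ' ' hk, ← hac, pvIsL, List.contains_eq_mem] at hL
  simp [ha] at hL

theorem pv_E_findIdx_some (cs : List Char) (m : Nat) (hm : m < cs.length)
    (hL : pvIsL (cs.getD m ' ') = true) :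
    (pvE cs).findIdx? (fun q => q.1 == (m : Int))
      = some (cs.countP (fun d => pvIsL d && decide (d < cs.getD m ' '))
          + (cs.take m).count (cs.getD m ' ')) := by
  have hc : cs.getD m ' ' ∈ pvAlpha := by
    rw [pvIsL, List.contains_eq_mem] at hL
    exact of_decide_eq_true hL
  have hk : (((PySem.List.enumerate cs 0).filter
        (fun jc => cs.getD m ' ' == jc.2)).findIdx? (fun q => q.1 == (m : Int)))
      = some ((cs.take m).count (cs.getD m ' ')) := by
    have := pv_block_findIdx cs 0 m (cs.getD m ' ') hm rfl
    simpa using this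
  have hnone : ∀ a ∈ pvAlpha, a ≠ cs.getD m ' ' →
      (((PySem.List.enumerate cs 0).filter (fun jc => a == jc.2)).findIdx?
        (fun q => q.1 == (m : Int))) = none := by
    intro a _ hne
    rw [List.findIdx?_eq_none_iff]
    intro q hq
    rcases List.mem_filter.mp hq with ⟨hqe, hqc⟩
    rcases (PySem.List.mem_enumerate_iff cs 0 q).mp hqe with ⟨k, hk', hqk⟩
    rw [beq_eq_false_iff_ne]
    intro hq1
    rw [hqk] at hq1 hqc
    simp only [zero_add] at hq1
    have hkm : k = m := by exact_mod_cast hq1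
    subst hkm
    rw [beq_iff_eq] at hqc
    rw [List.getD_eq_getElem cs ' ' hm] at hne
    exact hne hqc
  rw [pvE, pv_findIdx_flatMap pvAlpha _ _ (cs.getD m ' ') hc hnone _ hk]
  congr 1
  rw [pv_takeWhile_ne_eq_filter_lt _ _ (by decide) hc]
  have h1 : (pvAlpha.filter (fun x => x < cs.getD m ' ')).map
        (fun a => ((PySem.List.enumerate cs 0).filter (fun jc => a == jc.2)).length)
      = (pvAlpha.filter (fun x => x < cs.getD m ' ')).map (fun a => cs.count a) := by
    refine List.map_congr_left ?_
    intro a _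
    exact pv_block_len cs 0 a
  rw [h1, pv_sum_counts_nat _ (List.Nodup.filter _ (by decide)) cs]
  congr 1
  refine List.countP_congr ?_
  intro d _
  simp only [List.contains_eq_mem, List.mem_filter, pvIsL]
  by_cases h : d ∈ pvAlpha <;> simp [h, List.contains_eq_mem, Bool.and_comm]

theorem pv_inner_eq (cs : List Char) (a : Char) (st : List Int × Int) :
    (PySem.List.pyRange 0 ((cs.length : Int))).foldl
      (fun st j => if a == PySem.List.pyGetD cs j ' ' then
          (PySem.List.pySetD st.1 j (st.2 + 1), st.2 + 1) else st) st
    = ((PySem.List.enumerate cs 0).filter (fun jc => a == jc.2)).foldl pvStep st := by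
  rw [List.foldl_filter, PySem.List.enumerate_eq_map_pyRange cs ' ', List.foldl_map]
  rfl

theorem A_eq_rfold (key : String) :
    Keyword_Letter_Num key
      = ((pvE key.toList).foldl pvStep
          (PySem.List.pyRange 0 (key.toList.length : Int), 0)).1 := by
  unfold Keyword_Letter_Num
  simp only [PySem.Str.len_eq]
  rw [PySem.List.foldl_pyRange_zero_pyGetD' "ABCDEFGHIJKLMNOPQRSTUVWXYZ".toList ' '
    (fun st a => (PySem.List.pyRange 0 ((key.toList.length : Int))).foldl
      (fun st j => if a == PySem.List.pyGetD key.toList j ' ' then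
          (PySem.List.pySetD st.1 j (st.2 + 1), st.2 + 1) else st) st)]
  simp only [pv_inner_eq]
  rw [pv_foldl_foldl_flatMap]
  rfl

theorem A_eq_model (key : String) : Keyword_Letter_Num key = pvModel key.toList := by
  rw [A_eq_rfold]
  have hlen0 : (PySem.List.pyRange 0 (key.toList.length : Int)).length = key.toList.length := by
    rw [PySem.List.length_pyRange_one]
    omega
  refine List.ext_getElem ?_ ?_
  · rw [pv_rfold_len, hlen0, pvModel, List.length_map, List.length_range]
  · intro m h1 h2
    have hm : m < key.toList.length := by
      rw [pv_rfold_len, hlen0] at h1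
      exact h1
    have hget : ((pvE key.toList).foldl pvStep
          (PySem.List.pyRange 0 (key.toList.length : Int), 0)).1[m]
        = PySem.List.pyGetD ((pvE key.toList).foldl pvStep
          (PySem.List.pyRange 0 (key.toList.length : Int), 0)).1 (m : Int) 0 := by
      rw [PySem.List.pyGetD_eq_getElem _ 0 (by omega)
        (by rw [pv_rfold_len, hlen0]; exact_mod_cast hm)]
      simp
    rw [hget]
    rw [pv_rfold_getD _ _ _ (pv_E_nodup key.toList)
      (by rw [hlen0]; exact pv_E_bound key.toList) m (by rw [hlen0]; exact hm)]
    have hmodel : (pvModel key.toList)[m]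
        = if pvIsL (key.toList.getD m ' ') then pvRank key.toList m else (m : Int) := by
      simp only [pvModel]
      rw [List.getElem_map, List.getElem_range]
    rw [hmodel]
    by_cases hL : pvIsL (key.toList.getD m ' ') = true
    · rw [pv_E_findIdx_some key.toList m hm hL]
      simp only [hL, if_pos]
      rw [pvRank]
      have htake : (key.toList.take (m + 1)).count (key.toList.getD m ' ')
          = (key.toList.take m).count (key.toList.getD m ' ') + 1 := by
        rw [List.take_add_one, List.count_append]
        have : key.toList[m]? = some (key.toList.getD m ' ') := by
          rw [List.getElem?_eq_getElem hm, List.getD_eq_getElem _ _ hm]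
        rw [this]
        simp
      rw [htake]
      push_cast
      ring
    · have hL' : pvIsL (key.toList.getD m ' ') = false := by
        rw [Bool.eq_false_iff]; exact hL
      rw [pv_E_findIdx_none key.toList m hm hL']
      simp only [hL', Bool.false_eq_true, if_false]
      rw [PySem.List.pyGetD_eq_getElem _ 0 (by omega) (by rw [hlen0]; exact_mod_cast hm)]
      rw [PySem.List.getElem_pyRange_one]
      simp

-- ===== VERDICT (by name: the statement is the Claim_ definition above) =====
theorem Keyword_Letter_Num_spec : Claim_equal_Keyword_Letter_Num := by
  intro key _
  unfold Spec_Keyword_Letter_Num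
  rw [A_eq_model, B_eq_model]
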